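-- pv_equiv track=rewrite | github.com/allanlzee/Python-ICS | Functions/n_digit_sum.py | n_digit_sum
-- ===== SOURCE A (Python) =====
-- def n_digit_sum(number, group):
--     """Returns the sum of the digits of a string grouped as
--     "group"-digit numbers. If there are leftover digits, they
--     are added regardless of the grouping."""
--
--     digit_group = ""
--     total_sum = 0
--
--     for i in range(len(number)):
--         # Add digit to temporary group of digits.
--         digit_group += number[i]
--
--         # A full group of digits is formed, so it can be added to the sum.
--         if len(digit_group) % int(group) == 0:
--             total_sum += int(digit_group)
--             digit_group = ""
--
--     # Left over numbers
--     if len(number) % int(group) != 0: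
--         total_sum += int(digit_group)
--
--     return total_sum
-- ===== SOURCE B (Python) =====
-- def n_digit_sum(number, group):
--     """Returns the sum of the digits of a string grouped as
--     "group"-digit numbers; a leftover partial group is added as-is."""
--     g = int(group)
--     total = 0
--     i = 0
--     while i < len(number):
--         total += int(number[i:i + g])
--         i += g
--     return total
-- ===== Notes on version B (the rewrite author's own statement) =====
-- stated objective: simpler
-- what changed: B walks the string chunk-by-chunk, slicing number[i:i+g] and summing int() of each slice, eliminating A's per-character accumulator string, running modulo check and separate leftover branch.
-- outside the precondition, e.g. on n_digit_sum('12', -1): A returns 3, B raises ValueError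
import Mathlib
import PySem

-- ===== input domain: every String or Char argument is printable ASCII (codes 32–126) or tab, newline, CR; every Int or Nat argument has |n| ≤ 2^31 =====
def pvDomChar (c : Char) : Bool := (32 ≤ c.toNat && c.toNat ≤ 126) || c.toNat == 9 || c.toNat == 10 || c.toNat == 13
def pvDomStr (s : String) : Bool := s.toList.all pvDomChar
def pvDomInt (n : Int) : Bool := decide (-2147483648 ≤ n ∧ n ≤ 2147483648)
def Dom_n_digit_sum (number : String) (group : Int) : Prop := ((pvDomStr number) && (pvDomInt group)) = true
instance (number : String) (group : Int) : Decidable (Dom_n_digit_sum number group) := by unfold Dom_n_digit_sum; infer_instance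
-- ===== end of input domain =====

-- B replaces A's per-character accumulator + modulo flush by a while-loop summing int() of the stride-group slices number[i:i+g] (simpler decomposition).


-- ===== PORT A =====
-- loop body of A's for-loop: digit_group += number[i]; flush into the sum when len(digit_group) % group == 0
def n_digit_sum_step (group : Int) (s : List Char × Int) (c : Char) : List Char × Int :=
  if PySem.Int.mod (((s.1 ++ [c]).length : Nat) : Int) group = 0 then
    ([], s.2 + (PySem.Int.ofChars? (s.1 ++ [c])).getD 0)   -- int(digit_group); Pre_ guarantees it parses
  else (s.1 ++ [c], s.2)

def n_digit_sum (number : String) (group : Int) : Int :=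
  let st := number.toList.foldl (n_digit_sum_step group) ([], 0)
  if PySem.Int.mod (number.toList.length : Int) group ≠ 0 then
    st.2 + (PySem.Int.ofChars? st.1).getD 0   -- int(digit_group) of the leftover
  else st.2

-- ===== PORT B =====
-- B's while-loop: i walks 0, g, 2g, …; fuel bounds the iteration count (the loop runs at most
-- len(number) times when group ≥ 1; outside Pre_ nothing is claimed)
def n_digit_sum_go (l : List Char) (group : Int) : Nat → Int → Int → Int
  | 0, _, total => total
  | fuel + 1, i, total =>
      if i < (l.length : Int) then
        n_digit_sum_go l group fuel (i + group)
          (total + (PySem.Int.ofChars? (PySem.List.slice l (some i) (some (i + group)))).getD 0)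
      else total

def n_digit_sum_alt (number : String) (group : Int) : Int :=
  n_digit_sum_go number.toList group (number.toList.length + 1) 0 0

-- ===== PRECONDITION & SPEC =====
-- Pre_ requires every stride-group slice to be int-parsable and group > 0 (or an empty string with
-- group ≠ 0, where both return 0): for group = 0 A raises ZeroDivisionError and for a non-parsable
-- chunk A raises ValueError; for negative group on a nonempty string (a corner no caller would
-- specify) B's slices shrink to '' and raise ValueError while A accidentally groups by the divisor's
-- magnitude through Python's sign-following modulo — so those inputs are excluded.
def Pre_n_digit_sum (number : String) (group : Int) : Prop :=
  (0 < group ∨ (number.toList = [] ∧ group ≠ 0)) ∧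
    ∀ i ∈ PySem.List.pyRange 0 (number.toList.length : Int) group,
      (PySem.Int.ofChars? (PySem.List.slice number.toList (some i) (some (i + group)))).isSome = true
instance (number : String) (group : Int) : Decidable (Pre_n_digit_sum number group) := by
  unfold Pre_n_digit_sum; infer_instance

def pvWitness_n_digit_sum : String × Int := ("123456", 2)

def Spec_n_digit_sum (number : String) (group : Int) (out : Int) : Prop := out = n_digit_sum_alt number group
instance (number : String) (group : Int) (out : Int) : Decidable (Spec_n_digit_sum number group out) := by unfold Spec_n_digit_sum; infer_instance

-- ===== CLAIM (what is proved, stated in full; the proofs are below) =====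
def Claim_equal_n_digit_sum : Prop := ∀ (number : String) (group : Int), Dom_n_digit_sum number group → Pre_n_digit_sum number group → Spec_n_digit_sum number group (n_digit_sum number group)

-- ===== LEMMAS AND PROOFS =====

-- reference value: sum of int() of the (k+1)-sized chunks of l
def pvChunkSum (k : Nat) : List Char → Int
  | [] => 0
  | c :: t =>
      (PySem.Int.ofChars? ((c :: t).take (k + 1))).getD 0 + pvChunkSum k ((c :: t).drop (k + 1))
termination_by l => l.length
decreasing_by simp [List.length_drop]

-- A's loop leaves a partial group untouched
lemma pvFill (gn : Nat) (hgn : 0 < gn) :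
    ∀ (p dg : List Char) (t : Int), dg.length + p.length < gn →
      List.foldl (n_digit_sum_step (gn : Int)) (dg, t) p = (dg ++ p, t) := by
  have hpos : (0:Int) < (gn:Int) := by exact_mod_cast hgn
  intro p
  induction p with
  | nil => intro dg t _; simp
  | cons c p ih =>
    intro dg t h
    have hmod : ¬ PySem.Int.mod (((dg ++ [c]).length : Nat) : Int) (gn : Int) = 0 := by
      rw [PySem.Int.mod_eq_emod_of_pos hpos,
          Int.emod_eq_of_lt (by positivity) (by simp at h ⊢; omega)]
      simp
      omega
    have hstep : n_digit_sum_step (gn : Int) (dg, t) c = (dg ++ [c], t) := by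
      simp only [n_digit_sum_step]
      rw [if_neg hmod]
    rw [List.foldl_cons, hstep, ih (dg ++ [c]) t (by simp at h ⊢; omega)]
    simp

-- A's loop flushes a full group
lemma pvChunkStep (gn : Nat) (hgn : 0 < gn) (p rest : List Char) (t : Int) (hp : p.length = gn) :
    List.foldl (n_digit_sum_step (gn : Int)) (([] : List Char), t) (p ++ rest) =
      List.foldl (n_digit_sum_step (gn : Int)) (([] : List Char), t + (PySem.Int.ofChars? p).getD 0) rest := by
  have hpos : (0:Int) < (gn:Int) := by exact_mod_cast hgn
  rcases p.eq_nil_or_concat with rfl | ⟨q, c, rfl⟩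
  · simp at hp; omega
  · have hq : q.length = gn - 1 := by simp [List.concat_eq_append] at hp ⊢; omega
    rw [List.concat_eq_append, List.append_assoc, List.foldl_append]
    rw [pvFill gn hgn q [] t (by simp [hq]; omega)]
    have hmod : PySem.Int.mod ((((([] : List Char) ++ q) ++ [c]).length : Nat) : Int) (gn : Int) = 0 := by
      have hlen : (((([] : List Char) ++ q) ++ [c]).length : Int) = (gn : Int) := by
        simp [hq]; omega
      rw [hlen, PySem.Int.mod_eq_emod_of_pos hpos, Int.emod_self]
    have hstep : n_digit_sum_step (gn : Int) (([] ++ q : List Char), t) c =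
        ([], t + (PySem.Int.ofChars? (q ++ [c])).getD 0) := by
      simp only [n_digit_sum_step]
      rw [if_pos hmod]
      simp
    rw [List.singleton_append, List.foldl_cons, hstep]

lemma pvAmain (gn : Nat) (hgn : 0 < gn) :
    ∀ (fuel : Nat) (l : List Char) (t : Int), l.length ≤ fuel →
      (if PySem.Int.mod (l.length : Int) (gn : Int) ≠ 0 then
         (l.foldl (n_digit_sum_step (gn : Int)) ([], t)).2 +
           (PySem.Int.ofChars? (l.foldl (n_digit_sum_step (gn : Int)) ([], t)).1).getD 0
       else (l.foldl (n_digit_sum_step (gn : Int)) ([], t)).2) = t + pvChunkSum (gn - 1) l := by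
  have hpos : (0:Int) < (gn:Int) := by exact_mod_cast hgn
  intro fuel
  induction fuel with
  | zero =>
    intro l t h
    have hl : l = [] := List.eq_nil_of_length_eq_zero (by omega)
    subst hl
    simp [pvChunkSum, PySem.Int.mod_eq_emod_of_pos hpos]
  | succ n ih =>
    intro l t h
    rcases l with _ | ⟨c, tl⟩
    · simp [pvChunkSum, PySem.Int.mod_eq_emod_of_pos hpos]
    · by_cases hlt : (c :: tl).length < gn
      · -- only a partial group: the loop never flushes; the leftover branch fires
        rw [pvFill gn hgn (c :: tl) [] t (by simp at hlt ⊢; omega)]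
        rw [PySem.Int.mod_eq_emod_of_pos hpos,
            Int.emod_eq_of_lt (by positivity) (by exact_mod_cast hlt)]
        rw [if_pos (by simp; omega)]
        have h1 : (c :: tl).take (gn - 1 + 1) = c :: tl := List.take_of_length_le (by omega)
        have h2 : (c :: tl).drop (gn - 1 + 1) = [] := List.drop_eq_nil_of_le (by omega)
        rw [pvChunkSum, h1, h2, pvChunkSum]
        simp
      · -- a full group at the front: flush it and recurse
        rw [Nat.not_lt] at hlt
        have htake : ((c :: tl).take gn).length = gn := by
          rw [List.length_take]
          simp only [List.length_cons] at hlt ⊢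
          omega
        have hfold : (c :: tl).foldl (n_digit_sum_step (gn : Int)) ([], t)
            = ((c :: tl).drop gn).foldl (n_digit_sum_step (gn : Int))
                ([], t + (PySem.Int.ofChars? ((c :: tl).take gn)).getD 0) := by
          conv_lhs => rw [(List.take_append_drop gn (c :: tl)).symm]
          exact pvChunkStep gn hgn _ _ t htake
        have hmod : PySem.Int.mod (((c :: tl).length : Nat) : Int) (gn : Int)
            = PySem.Int.mod ((((c :: tl).drop gn).length : Nat) : Int) (gn : Int) := by
          rw [PySem.Int.mod_eq_emod_of_pos hpos, PySem.Int.mod_eq_emod_of_pos hpos]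
          have hd : ((c :: tl).drop gn).length = (c :: tl).length - gn := by simp
          have hlen : (((c :: tl).length : Nat) : Int)
              = ((((c :: tl).drop gn).length : Nat) : Int) + (gn : Int) * 1 := by
            omega
          rw [hlen, Int.add_mul_emod_self_left]
        rw [hfold, hmod, ih ((c :: tl).drop gn) _
          (by have hd : ((c :: tl).drop gn).length = (c :: tl).length - gn := by simp
              simp only [List.length_cons] at h hd ⊢
              omega)]
        rw [pvChunkSum]
        have hg1 : gn - 1 + 1 = gn := by omega
        rw [hg1]
        ring

lemma pvGo (gn : Nat) (hgn : 0 < gn) :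
    ∀ (fuel : Nat) (l : List Char) (j : Nat) (t : Int), l.length - j < fuel →
      n_digit_sum_go l (gn : Int) fuel (j : Int) t = t + pvChunkSum (gn - 1) (l.drop j) := by
  intro fuel
  induction fuel with
  | zero => intro l j t h; omega
  | succ n ih =>
    intro l j t h
    by_cases hj : j < l.length
    · rw [n_digit_sum_go, if_pos (by exact_mod_cast hj)]
      have h1 : ((j : Int) + (gn : Int)) = ((j + gn : Nat) : Int) := by push_cast; ring
      rw [h1, PySem.List.slice_natCast, show j + gn - j = gn by omega,
          ih l (j + gn) _ (by omega)]
      obtain ⟨c, m, hm⟩ : ∃ c m, l.drop j = c :: m := by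
        cases h' : l.drop j with
        | nil => exact absurd (List.length_drop (l := l) (i := j)) (by rw [h']; simp; omega)
        | cons c m => exact ⟨c, m, rfl⟩
      have hdd : l.drop (j + gn) = (l.drop j).drop gn := by
        rw [List.drop_drop]
      rw [hdd, hm, pvChunkSum]
      have hg1 : gn - 1 + 1 = gn := by omega
      rw [hg1]
      ring
    · rw [n_digit_sum_go, if_neg (by omega)]
      rw [List.drop_eq_nil_of_le (by omega), pvChunkSum]
      ring

-- ===== VERDICT (by name: the statement is the Claim_ definition above) =====
theorem n_digit_sum_spec : Claim_equal_n_digit_sum := by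
  intro number group _ hpre
  obtain ⟨hg | ⟨hemp, -⟩, -⟩ := hpre
  case inr =>
    show n_digit_sum number group = n_digit_sum_alt number group
    simp [n_digit_sum, n_digit_sum_alt, hemp, n_digit_sum_go, PySem.Int.mod]
  obtain ⟨gn, rfl⟩ : ∃ gn : Nat, group = (gn : Int) := ⟨group.toNat, (Int.toNat_of_nonneg hg.le).symm⟩
  have hgn : 0 < gn := by exact_mod_cast hg
  have hA : n_digit_sum number (gn : Int) = 0 + pvChunkSum (gn - 1) number.toList :=
    pvAmain gn hgn number.toList.length number.toList 0 le_rfl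
  have hB : n_digit_sum_alt number (gn : Int) = pvChunkSum (gn - 1) number.toList := by
    have hgo := pvGo gn hgn (number.toList.length + 1) number.toList 0 0 (by omega)
    rw [n_digit_sum_alt]
    simpa using hgo
  show n_digit_sum number (gn : Int) = n_digit_sum_alt number (gn : Int)
  rw [hA, hB, zero_add]
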